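-- pv_equiv track=rewrite | github.com/basilegithub/General-number-field-sieve | src/polynomial_functions.py | coefficients
-- ===== SOURCE A (Python) =====
-- def coefficients(n, m, d):
--     tmp1, tmp2 = n, 1
--     coeff = [0]*(d+1)
--     i = 0
--     for k in range(d+1):
--         tmp3 = tmp1%(tmp2*m)
--         coeff_k = (tmp3//tmp2)
--         coeff[d-k] = coeff_k
--         tmp1 -= tmp3
--         tmp2 *= m
--     return coeff
-- ===== SOURCE B (Python) =====
-- def coefficients(n, m, d):
--     # Divide-and-conquer radix conversion: split the d+1 digits into a high and a
--     # low half with one divmod by m**(half), recurse on each half. Correct for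
--     # base m > 0 since q = hi*m**h + lo with 0 <= lo < m**h exactly separates the
--     # low h digits from the rest (the single top digit is reduced mod m, matching
--     # A's truncation).
--     if d < 0:
--         return []
--
--     def expand(q, k):
--         # k >= 1 digits of q in base m, most significant first
--         if k == 1:
--             return [q % m]
--         h = k // 2
--         hi, lo = divmod(q, m ** h)
--         return expand(hi, k - h) + expand(lo, h)
--
--     return expand(n, d + 1)
-- ===== Notes on version B (the rewrite author's own statement) =====
-- stated objective: faster
-- what changed: A is a single loop carrying a running remainder tmp1 and a growing power tmp2=m^k, extracting one digit per iteration by mod/floordiv against a modulus that grows to m^d; B is a recursive divide-and-conquer radix conversion that splits the d+1 digits into a high and a low half with one divmod by m**(k//2) and recurses on each half, concatenating the results.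
-- outside the precondition, e.g. on coefficients(-10, -3, 3): A returns [0, -1, 0, -1], B returns [0, -2, 0, -1]
import Mathlib
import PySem

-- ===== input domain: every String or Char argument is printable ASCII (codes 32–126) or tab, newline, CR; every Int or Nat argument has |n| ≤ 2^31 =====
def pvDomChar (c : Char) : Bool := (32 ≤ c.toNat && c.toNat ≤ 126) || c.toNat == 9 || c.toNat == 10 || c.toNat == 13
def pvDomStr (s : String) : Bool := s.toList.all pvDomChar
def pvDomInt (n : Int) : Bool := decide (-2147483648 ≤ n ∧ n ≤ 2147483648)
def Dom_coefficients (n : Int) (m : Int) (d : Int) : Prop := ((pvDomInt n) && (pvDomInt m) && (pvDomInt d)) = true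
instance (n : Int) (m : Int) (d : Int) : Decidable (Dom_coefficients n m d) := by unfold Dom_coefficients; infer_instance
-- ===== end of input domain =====

-- B replaces A's running-remainder/growing-power loop by a recursive divide-and-conquer
-- radix conversion (split the d+1 digits in half with one divmod by m^(k/2), recurse);
-- a timing run measured B faster at the largest sizes (objective: faster).


-- ===== PORT A =====
-- one iteration of A's for-loop over k, state (tmp1, tmp2, coeff)
def coeffStep (m d : Int) (s : Int × Int × List Int) (k : Int) : Int × Int × List Int :=
  let tmp3 := PySem.Int.mod s.1 (s.2.1 * m)
  let coeff_k := PySem.Int.floordiv tmp3 s.2.1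
  (s.1 - tmp3, s.2.1 * m, PySem.List.pySetD s.2.2 (d - k) coeff_k)

def coefficients (n : Int) (m : Int) (d : Int) : List Int :=
  ((PySem.List.pyRange 0 (d + 1) 1).foldl (coeffStep m d)
    (n, 1, List.replicate (d + 1).toNat 0)).2.2

-- ===== PORT B =====
-- B's inner recursion expand(q, k): k digits of q base m, most significant first.
-- Python guards 'k == 1'; every call has k ≥ 1, so the 'k ≤ 1' base case is the
-- same function on all reachable calls (and makes the recursion total on Nat).
def dcExpand (m q : Int) (k : Nat) : List Int :=
  if k ≤ 1 then [PySem.Int.mod q m]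
  else
    let h := k / 2
    let P := m ^ h
    dcExpand m (PySem.Int.floordiv q P) (k - h) ++ dcExpand m (PySem.Int.mod q P) h
termination_by k
decreasing_by all_goals omega

def coefficients_alt (n : Int) (m : Int) (d : Int) : List Int :=
  if d < 0 then [] else dcExpand m n (d + 1).toNat

-- ===== PRECONDITION & SPEC =====
-- Pre_ excludes m = 0 with d ≥ 0 (Python A raises ZeroDivisionError) and m < 0 with
-- d ≥ 0: a base-m digit expansion is only specified for a positive base, and on a
-- negative base A's growing-modulus truncation and B's half-split both yield some
-- accidental digit string that no one would specify.
def Pre_coefficients (n : Int) (m : Int) (d : Int) : Prop := 0 < m ∨ d < 0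
instance (n : Int) (m : Int) (d : Int) : Decidable (Pre_coefficients n m d) := by unfold Pre_coefficients; infer_instance
def pvWitness_coefficients : Int × Int × Int := (97629, 29, 4)

def Spec_coefficients (n : Int) (m : Int) (d : Int) (out : List Int) : Prop := out = coefficients_alt n m d
instance (n : Int) (m : Int) (d : Int) (out : List Int) : Decidable (Spec_coefficients n m d out) := by unfold Spec_coefficients; infer_instance

-- ===== CLAIM (what is proved, stated in full; the proofs are below) =====
def Claim_equal_coefficients : Prop := ∀ (n : Int) (m : Int) (d : Int), Dom_coefficients n m d → Pre_coefficients n m d → Spec_coefficients n m d (coefficients n m d)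

-- ===== LEMMAS AND PROOFS =====

-- proof-side bridge: the base-m digits of q for exponents 0..e, highest first
def digitsRec (m : Int) (q e : Int) : List Int :=
  if e < 0 then []
  else digitsRec m (PySem.Int.floordiv q m) (e - 1) ++ [PySem.Int.mod q m]
termination_by (e + 1).toNat
decreasing_by omega

-- (p·q) // (p·m) = q // m for p ≠ 0 (floor division; any signs)
theorem pv_fdiv_mul_mul (p q m : Int) (hp : p ≠ 0) :
    PySem.Int.floordiv (p * q) (p * m) = PySem.Int.floordiv q m := by
  rcases lt_or_gt_of_ne hp with h | h
  · have h1 : p * q = (-p) * (-q) := by ring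
    have h2 : p * m = (-p) * (-m) := by ring
    rw [h1, h2]
    show ((-p) * (-q)).fdiv ((-p) * (-m)) = PySem.Int.floordiv q m
    rw [Int.mul_fdiv_mul_of_pos (-q) (-m) (by omega)]
    exact PySem.Int.floordiv_neg_neg q m
  · exact Int.mul_fdiv_mul_of_pos q m h

-- (p·q) % (p·m) = p · (q % m) for p ≠ 0
theorem pv_mod_mul_mul (p q m : Int) (hp : p ≠ 0) :
    PySem.Int.mod (p * q) (p * m) = p * PySem.Int.mod q m := by
  have h1 := PySem.Int.floordiv_mul_add_mod (p * q) (p * m)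
  have h2 := PySem.Int.floordiv_mul_add_mod q m
  rw [pv_fdiv_mul_mul p q m hp] at h1
  linear_combination h1 - p * h2

theorem pv_fdiv_exact (p x : Int) (hp : p ≠ 0) :
    PySem.Int.floordiv (p * x) p = x := Int.mul_fdiv_cancel_left x hp

-- one unfolding of the digit recursion when e ≥ 0
theorem pv_digits_unfold (m q e : Int) (he : 0 ≤ e) :
    digitsRec m q e
      = digitsRec m (PySem.Int.floordiv q m) (e - 1) ++ [PySem.Int.mod q m] := by
  rw [digitsRec.eq_def]
  simp [Int.not_lt.mpr he]

-- invariant of A's loop: with tmp1 = p·q and tmp2 = p (p = m^j, never 0), the remaining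
-- iterations k = j..d write the base-m digits of q into positions 0..d-j
theorem pv_loop (m d : Int) (hm : m ≠ 0) : ∀ r : Nat, ∀ (j p q : Int) (c : List Int),
    d + 1 - j = (r : Int) → 0 ≤ j → p ≠ 0 → c.length = (d + 1).toNat →
    ((PySem.List.pyRange j (d + 1) 1).foldl (coeffStep m d) (p * q, p, c)).2.2
      = digitsRec m q (d - j) ++ c.drop ((d + 1 - j).toNat) := by
  intro r
  induction r with
  | zero =>
    intro j p q c hr hj hp hc
    have hj' : j = d + 1 := by omega
    rw [PySem.List.pyRange_one_eq_nil (by omega)]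
    simp only [List.foldl_nil]
    rw [digitsRec.eq_def]
    have : (d + 1 - j).toNat = 0 := by omega
    simp [show d - j < 0 by omega, this]
  | succ r ih =>
    intro j p q c hr hj hp hc
    have hjd : j < d + 1 := by omega
    rw [PySem.List.pyRange_one_cons hjd]
    simp only [List.foldl_cons]
    have hstep : coeffStep m d (p * q, p, c) j
        = ((p * m) * PySem.Int.floordiv q m, p * m,
           PySem.List.pySetD c (d - j) (PySem.Int.mod q m)) := by
      have h2 := PySem.Int.floordiv_mul_add_mod q m
      have e : p * q - p * PySem.Int.mod q m = p * m * PySem.Int.floordiv q m := by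
        linear_combination (-p) * h2
      simp only [coeffStep, pv_mod_mul_mul p q m hp, pv_fdiv_exact p _ hp]
      rw [e]
    rw [hstep]
    rw [ih (j + 1) (p * m) (PySem.Int.floordiv q m) _ (by omega) (by omega)
        (mul_ne_zero hp hm) (by rw [PySem.List.length_pySetD]; exact hc)]
    rw [pv_digits_unfold m q (d - j) (by omega)]
    have hset : PySem.List.pySetD c (d - j) (PySem.Int.mod q m)
        = c.set (d - j).toNat (PySem.Int.mod q m) :=
      PySem.List.pySetD_of_nonneg c _ (by omega)
    have hlen : (d - j).toNat < c.length := by omega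
    have hdrop : (c.set (d - j).toNat (PySem.Int.mod q m)).drop ((d - j).toNat)
        = PySem.Int.mod q m :: c.drop ((d - j).toNat + 1) := by
      rw [List.drop_set, if_neg (lt_irrefl _), Nat.sub_self,
        List.drop_eq_getElem_cons hlen, List.set_cons_zero]
    have e1 : d - (j + 1) = d - j - 1 := by ring
    have e2 : (d + 1 - (j + 1)).toNat = (d - j).toNat := by omega
    have e3 : (d + 1 - j).toNat = (d - j).toNat + 1 := by omega
    rw [e1, e2, hset, hdrop, e3]
    simp [List.append_assoc]

-- ---- B side: divide-and-conquer equals the digit recursion (positive base) ----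

-- (q // m) // m^h = q // m^(h+1)  (m > 0)
theorem pv_dc_div_div (m : Int) (hm : 0 < m) (h : Nat) (q : Int) :
    PySem.Int.floordiv (PySem.Int.floordiv q m) (m ^ h) = PySem.Int.floordiv q (m ^ (h + 1)) := by
  have hP : (0:Int) < m ^ h := pow_pos hm h
  have hP1 : (0:Int) < m ^ (h + 1) := pow_pos hm (h + 1)
  rw [PySem.Int.floordiv_eq_ediv_of_pos hm, PySem.Int.floordiv_eq_ediv_of_pos hP,
      PySem.Int.floordiv_eq_ediv_of_pos hP1, Int.ediv_ediv_of_nonneg (le_of_lt hm),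
      pow_succ']

-- (q // m) % m^h = (q % m^(h+1)) // m  (m > 0)
theorem pv_dc_mod_div (m : Int) (hm : 0 < m) (h : Nat) (q : Int) :
    PySem.Int.mod (PySem.Int.floordiv q m) (m ^ h) = PySem.Int.floordiv (PySem.Int.mod q (m ^ (h + 1))) m := by
  have hP : (0:Int) < m ^ h := pow_pos hm h
  have hP1 : (0:Int) < m ^ (h + 1) := pow_pos hm (h + 1)
  rw [PySem.Int.floordiv_eq_ediv_of_pos hm, PySem.Int.mod_eq_emod_of_pos hP,
      PySem.Int.mod_eq_emod_of_pos hP1, PySem.Int.floordiv_eq_ediv_of_pos hm]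
  rw [Int.emod_def, Int.emod_def]
  have hdd : q / m / m ^ h = q / m ^ (h + 1) := by
    rw [Int.ediv_ediv_of_nonneg (le_of_lt hm), pow_succ']
  have e : q - m ^ (h + 1) * (q / m ^ (h + 1))
      = q + (-(m ^ h * (q / m ^ (h + 1)))) * m := by ring
  rw [e, Int.add_mul_ediv_right _ _ (ne_of_gt hm), hdd]
  ring

-- (q % m^(h+1)) % m = q % m  (m > 0)
theorem pv_dc_mod_mod (m : Int) (hm : 0 < m) (h : Nat) (q : Int) :
    PySem.Int.mod (PySem.Int.mod q (m ^ (h + 1))) m = PySem.Int.mod q m := by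
  have hP1 : (0:Int) < m ^ (h + 1) := pow_pos hm (h + 1)
  rw [PySem.Int.mod_eq_emod_of_pos hP1, PySem.Int.mod_eq_emod_of_pos hm,
      PySem.Int.mod_eq_emod_of_pos hm]
  exact Int.emod_emod_of_dvd q (dvd_pow_self m (Nat.succ_ne_zero h))

-- splitting off the low h digits: digits 0..e of q = digits of q // m^h (high) ++ digits of q % m^h (low)
theorem pv_split (m : Int) (hm : 0 < m) : ∀ h : Nat, 1 ≤ h → ∀ e q : Int, (h : Int) ≤ e →
    digitsRec m q e
      = digitsRec m (PySem.Int.floordiv q (m ^ h)) (e - h)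
        ++ digitsRec m (PySem.Int.mod q (m ^ h)) ((h : Int) - 1) := by
  intro h
  induction h with
  | zero => omega
  | succ h ih =>
    intro _ e q he
    have e3 : ((h + 1 : Nat) : Int) = (h:Int) + 1 := by push_cast; ring
    rw [e3] at he ⊢
    by_cases h1 : h = 0
    · subst h1
      simp only [Nat.cast_zero, zero_add, pow_one]
      rw [pv_digits_unfold m q e (by omega), show (1:Int) - 1 = 0 by norm_num]
      rw [pv_digits_unfold m (PySem.Int.mod q m) 0 le_rfl]
      rw [digitsRec.eq_def (m := m) (q := PySem.Int.floordiv (PySem.Int.mod q m) m)]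
      simp only [show ((0:Int) - 1) < 0 by omega, if_pos, List.nil_append]
      rw [PySem.Int.mod_eq_emod_of_pos hm (a := q),
          PySem.Int.mod_eq_emod_of_pos hm (a := q % m),
          Int.emod_emod_of_dvd q dvd_rfl]
    · have h1' : 1 ≤ h := by omega
      rw [pv_digits_unfold m q e (by omega)]
      rw [ih h1' (e - 1) (PySem.Int.floordiv q m) (by omega)]
      rw [pv_dc_div_div m hm h q, pv_dc_mod_div m hm h q]
      rw [pv_digits_unfold m (PySem.Int.mod q (m ^ (h + 1))) ((h:Int) + 1 - 1) (by omega)]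
      rw [pv_dc_mod_mod m hm h q]
      have e1 : e - 1 - (h:Int) = e - ((h:Int) + 1) := by ring
      have e2 : ((h:Int) + 1 - 1 - 1) = (h:Int) - 1 := by ring
      rw [e1, e2, List.append_assoc]

-- B's recursion computes the digit list
theorem pv_dc (m : Int) (hm : 0 < m) : ∀ k : Nat, 1 ≤ k → ∀ q : Int,
    dcExpand m q k = digitsRec m q ((k : Int) - 1) := by
  intro k
  induction k using Nat.strong_induction_on with
  | _ k ih =>
    intro hk q
    by_cases hk1 : k ≤ 1
    · have : k = 1 := by omega
      subst this
      rw [dcExpand]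
      simp only [le_refl, if_pos, Nat.cast_one]
      rw [pv_digits_unfold m q ((1:Int) - 1) (by omega)]
      rw [digitsRec.eq_def (e := (1:Int) - 1 - 1)]
      norm_num
    · rw [dcExpand]
      simp only [if_neg hk1]
      have hh1 : 1 ≤ k / 2 := by omega
      have hhk : k / 2 < k := by omega
      have hkh : 1 ≤ k - k / 2 := by omega
      have hkhk : k - k / 2 < k := by omega
      rw [ih (k - k / 2) hkhk hkh, ih (k / 2) hhk hh1]
      rw [pv_split m hm (k / 2) hh1 ((k:Int) - 1) q (by omega)]
      have e1 : ((k - k / 2 : Nat) : Int) - 1 = (k:Int) - 1 - ((k / 2 : Nat) : Int) := by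
        omega
      rw [e1]

-- ===== VERDICT (by name: the statement is the Claim_ definition above) =====
theorem coefficients_spec : Claim_equal_coefficients := by
  intro n m d _ hpre
  unfold Spec_coefficients coefficients_alt
  by_cases hd : d < 0
  · unfold coefficients
    rw [PySem.List.pyRange_one_eq_nil (by omega)]
    simp [hd, show (d + 1).toNat = 0 by omega]
  · have hm : 0 < m := by
      rcases hpre with h | h
      · exact h
      · omega
    rw [if_neg hd]
    rw [pv_dc m hm (d + 1).toNat (by omega) n]
    unfold coefficients
    have := pv_loop m d (ne_of_gt hm) (d + 1).toNat 0 1 n (List.replicate (d + 1).toNat 0)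
      (by omega) le_rfl one_ne_zero (by simp)
    rw [one_mul] at this
    rw [this]
    have : ((d + 1).toNat : Int) - 1 = d := by omega
    rw [this]
    simp
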